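-- pv_equiv track=rewrite | github.com/ncsad/amazon-tools | 定价计算器.py | shipping_uk
-- ===== SOURCE A (Python) =====
-- def shipping_uk(billing_w, l, w, h):
--     base = 25 + billing_w*50 if billing_w <= 3 else 57*billing_w + 30
--     d = sorted([l,w,h], reverse=True)
--     girth = (d[1]+d[2])*2 + d[0]
--     length_sur = 0
--     for threshold, fee in [(180,200),(170,180),(160,150),(150,100),(140,70),(120,32)]:
--         if d[0] >= threshold: length_sur = fee; break
--     girth_sur = 150 if girth >= 266 else 0
--     sur = max(length_sur, girth_sur)
--     warn = [f"⚠ 英国超规+{sur}元"] if sur > 0 else []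
--     return "英国经济线", base+sur, base, sur, warn
-- ===== SOURCE B (Python) =====
-- # Binary search over the ascending threshold list (no sort, no linear break-loop),
-- # girth via the closed form 2*(l+w+h) - max.
-- _UK_THRESH = [120, 140, 150, 160, 170, 180]
-- _UK_FEES = [0, 32, 70, 100, 150, 180, 200]
--
-- def shipping_uk(billing_w, l, w, h):
--     base = 25 + billing_w*50 if billing_w <= 3 else 57*billing_w + 30
--     mx = max(l, w, h)
--     girth = 2*(l + w + h) - mx
--     # bisect_right by hand: lo = number of thresholds <= mx
--     lo, hi = 0, len(_UK_THRESH)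
--     while lo < hi:
--         mid = (lo + hi) // 2
--         if _UK_THRESH[mid] <= mx:
--             lo = mid + 1
--         else:
--             hi = mid
--     girth_fee = 150 if girth >= 266 else 0
--     sur = max(_UK_FEES[lo], girth_fee)
--     warn = [f"⚠ 英国超规+{sur}元"] if sur > 0 else []
--     return "英国经济线", base + sur, base, sur, warn
-- ===== Notes on version B (the rewrite author's own statement) =====
-- stated objective: alternative
-- what changed: Drops the sort (girth from the closed form 2*(l+w+h)-max) and replaces the first-match break-loop over the descending fee table by a hand-written binary search (bisect_right) over the ascending threshold list that indexes into a fee array.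
import Mathlib
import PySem

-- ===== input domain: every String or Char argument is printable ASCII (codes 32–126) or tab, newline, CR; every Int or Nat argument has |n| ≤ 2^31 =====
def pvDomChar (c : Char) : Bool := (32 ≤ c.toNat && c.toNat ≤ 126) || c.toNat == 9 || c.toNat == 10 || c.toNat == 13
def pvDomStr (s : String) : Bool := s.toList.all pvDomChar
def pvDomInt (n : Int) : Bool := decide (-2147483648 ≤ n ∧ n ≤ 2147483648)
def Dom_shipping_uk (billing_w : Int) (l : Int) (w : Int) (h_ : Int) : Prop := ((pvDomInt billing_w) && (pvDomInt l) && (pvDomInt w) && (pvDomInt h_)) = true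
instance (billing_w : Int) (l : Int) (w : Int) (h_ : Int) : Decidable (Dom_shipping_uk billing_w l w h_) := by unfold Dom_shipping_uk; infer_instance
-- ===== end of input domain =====

-- B drops the sort (girth = 2*(l+w+h) - max) and replaces the first-match break-loop over the
-- descending fee table by a binary search over the ascending threshold list indexing a fee array.

-- ===== PORT A =====
-- the threshold/fee table of A's for-loop
def pvFeeTable : List (Int × Int) := [(180, 200), (170, 180), (160, 150), (150, 100), (140, 70), (120, 32)]

-- A's for-loop with break: first matching fee, else the initial 0
def pvLenSurLoop (d0 : Int) : List (Int × Int) → Int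
  | [] => 0
  | (t, f) :: rest => if d0 ≥ t then f else pvLenSurLoop d0 rest

def shipping_uk (billing_w : Int) (l : Int) (w : Int) (h_ : Int) : String × Int × Int × Int × List String :=
  let base := if billing_w ≤ 3 then 25 + billing_w * 50 else 57 * billing_w + 30
  let d := PySem.List.sorted [l, w, h_] (fun x => x) true
  let girth := (PySem.List.pyGetD d 1 0 + PySem.List.pyGetD d 2 0) * 2 + PySem.List.pyGetD d 0 0
  let length_sur := pvLenSurLoop (PySem.List.pyGetD d 0 0) pvFeeTable
  let girth_sur : Int := if girth ≥ 266 then 150 else 0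
  let sur := max length_sur girth_sur
  let warn := if sur > 0 then ["⚠ 英国超规+" ++ PySem.Int.toStr sur ++ "元"] else []
  ("英国经济线", base + sur, base, sur, warn)

-- ===== PORT B =====
def pvThresh : List Int := [120, 140, 150, 160, 170, 180]
def pvFees : List Int := [0, 32, 70, 100, 150, 180, 200]

-- Source B's while-loop (bisect_right by hand); index accesses are always in range
def pvBisect (xs : List Int) (x : Int) (lo hi : Int) : Int :=
  if h : lo < hi then
    let mid := PySem.Int.floordiv (lo + hi) 2
    if PySem.List.pyGetD xs mid 0 ≤ x then pvBisect xs x (mid + 1) hi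
    else pvBisect xs x lo mid
  else lo
termination_by (hi - lo).toNat
decreasing_by
  · have := PySem.Int.floordiv_two_mid_bounds (le_of_lt h)
    omega
  · have hb : PySem.Int.floordiv (lo + hi) 2 < hi := by
      rw [PySem.Int.floordiv_lt_iff_lt_mul (by omega : (0:Int) < 2)]
      omega
    have := PySem.Int.floordiv_two_mid_bounds (le_of_lt h)
    omega

def shipping_uk_alt (billing_w : Int) (l : Int) (w : Int) (h_ : Int) : String × Int × Int × Int × List String :=
  let base := if billing_w ≤ 3 then 25 + billing_w * 50 else 57 * billing_w + 30
  let mx := max (max l w) h_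
  let girth := 2 * (l + w + h_) - mx
  let lo := pvBisect pvThresh mx 0 6
  let girth_fee : Int := if girth ≥ 266 then 150 else 0
  let sur := max (PySem.List.pyGetD pvFees lo 0) girth_fee
  let warn := if sur > 0 then ["⚠ 英国超规+" ++ PySem.Int.toStr sur ++ "元"] else []
  ("英国经济线", base + sur, base, sur, warn)

-- ===== PRECONDITION & SPEC =====
def Spec_shipping_uk (billing_w : Int) (l : Int) (w : Int) (h_ : Int) (out : String × Int × Int × Int × List String) : Prop := out = shipping_uk_alt billing_w l w h_
instance (billing_w : Int) (l : Int) (w : Int) (h_ : Int) (out : String × Int × Int × Int × List String) : Decidable (Spec_shipping_uk billing_w l w h_ out) := by unfold Spec_shipping_uk; infer_instance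

-- ===== CLAIM (what is proved, stated in full; the proofs are below) =====
def Claim_equal_shipping_uk : Prop := ∀ (billing_w : Int) (l : Int) (w : Int) (h_ : Int), Dom_shipping_uk billing_w l w h_ → Spec_shipping_uk billing_w l w h_ (shipping_uk billing_w l w h_)

-- ===== LEMMAS AND PROOFS =====

-- the sorted-descending triple: shape [a,b,c] with a the max and the sum preserved
theorem pv_sorted3 (l w h_ : Int) :
    ∃ a b c, PySem.List.sorted [l, w, h_] (fun x => x) true = [a, b, c] ∧
      a = max (max l w) h_ ∧ a + b + c = l + w + h_ := by
  have hlen : (PySem.List.sorted [l, w, h_] (fun x => x) true).length = 3 := by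
    simp [PySem.List.length_sorted]
  match hspl : PySem.List.sorted [l, w, h_] (fun x => x) true, hlen with
  | [a, b, c], _ =>
    refine ⟨a, b, c, rfl, ?_, ?_⟩
    · have hperm : ([a, b, c] : List Int).Perm [l, w, h_] := hspl ▸ PySem.List.sorted_perm ..
      have hmem : a ∈ ([l, w, h_] : List Int) := hperm.mem_iff.mp (by simp)
      have hge := PySem.List.key_head_sorted_rev_ge (xs := [l, w, h_]) (key := fun x => x) hspl
      have h1 := hge l (by simp)
      have h2 := hge w (by simp)
      have h3 := hge h_ (by simp)
      simp only [List.mem_cons] at hmem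
      rcases hmem with rfl | rfl | h
      · simp at h1 h2 h3 ⊢; omega
      · simp at h1 h2 h3 ⊢; omega
      · simp at h; subst h; simp at h1 h2 h3 ⊢; omega
    · have hperm : ([a, b, c] : List Int).Perm [l, w, h_] := hspl ▸ PySem.List.sorted_perm ..
      have := hperm.sum_eq
      simp at this; omega

-- A's break-loop equals B's binary-search index into the fee array
theorem pv_loop_eq_bisect (x : Int) :
    pvLenSurLoop x pvFeeTable = PySem.List.pyGetD pvFees (pvBisect pvThresh x 0 6) 0 := by
  by_cases h1 : x ≥ 180 <;> by_cases h2 : x ≥ 170 <;> by_cases h3 : x ≥ 160 <;>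
    by_cases h4 : x ≥ 150 <;> by_cases h5 : x ≥ 140 <;> by_cases h6 : x ≥ 120
  all_goals first
    | omega
    | (simp only [pvFeeTable, pvThresh, pvFees, pvLenSurLoop]
       rw [pvBisect.eq_def]
       simp [PySem.List.pyGetD, PySem.List.pyGet?, PySem.List.pyIdx?, PySem.Int.floordiv,
             h1, h2, h3, h4, h5, h6, pvBisect.eq_def])

-- ===== VERDICT (by name: the statement is the Claim_ definition above) =====
theorem shipping_uk_spec : Claim_equal_shipping_uk := by
  intro billing_w l w h_ _
  unfold Spec_shipping_uk shipping_uk shipping_uk_alt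
  obtain ⟨a, b, c, hd, hmax, hsum⟩ := pv_sorted3 l w h_
  rw [hd]
  dsimp only
  rw [pv_loop_eq_bisect]
  have hg : (PySem.List.pyGetD [a,b,c] 1 0 + PySem.List.pyGetD [a,b,c] 2 0) * 2 + PySem.List.pyGetD [a,b,c] 0 0
      = 2 * (l + w + h_) - max (max l w) h_ := by
    simp [PySem.List.pyGetD, PySem.List.pyGet?, PySem.List.pyIdx?]
    omega
  have h0 : PySem.List.pyGetD ([a,b,c] : List Int) 0 0 = max (max l w) h_ := by
    simp [PySem.List.pyGetD, PySem.List.pyGet?, PySem.List.pyIdx?]; omega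
  rw [hg, h0]
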